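-- pv_equiv track=rewrite | github.com/kenleung5e28/advent-of-code-2021 | day17-2.py | mid_traj
-- ===== SOURCE A (Python) =====
-- def mid_traj(vx: int, vy: int) -> tuple[list[int], int]:
--   res = [(0, 0)]
--   x, y = 0, 0
--   while vx != 0 or vy > 0:
--     x += vx
--     y += vy
--     res.append((x, y))
--     if vx < 0:
--       vx += 1
--     elif vx > 0:
--       vx -= 1
--     vy -= 1
--   return res, vy
-- ===== SOURCE B (Python) =====
-- def tri(m):
--     return m * (m - 1) // 2
--
-- def mid_traj(vx: int, vy: int) -> tuple[list[int], int]: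
--     a = abs(vx)
--     s = (vx > 0) - (vx < 0)
--     n = max(a, vy)
--     res = [(s * (min(t, a) * a - tri(min(t, a))), t * vy - tri(t)) for t in range(n + 1)]
--     return res, vy - n
-- ===== Notes on version B (the rewrite author's own statement) =====
-- stated objective: alternative
-- what changed: B computes the step count n = max(|vx|, vy) up front and builds every position by closed-form capped triangular-number formulas over range(n+1), instead of A's per-step simulation of (x, y, vx, vy) with the velocity-decay branches.
import Mathlib
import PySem

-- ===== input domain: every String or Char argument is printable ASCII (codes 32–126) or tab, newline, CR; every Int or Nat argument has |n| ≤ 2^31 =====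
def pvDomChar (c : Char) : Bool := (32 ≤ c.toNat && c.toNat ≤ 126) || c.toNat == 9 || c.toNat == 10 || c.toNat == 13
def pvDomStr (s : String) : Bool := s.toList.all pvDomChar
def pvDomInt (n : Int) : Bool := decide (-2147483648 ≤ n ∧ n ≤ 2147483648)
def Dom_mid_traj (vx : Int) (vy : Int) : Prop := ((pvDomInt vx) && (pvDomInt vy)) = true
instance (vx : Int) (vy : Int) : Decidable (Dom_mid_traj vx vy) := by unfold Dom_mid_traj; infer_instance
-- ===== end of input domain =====

-- B replaces A's step-by-step simulation with closed-form positions (capped triangular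
-- numbers) over a range whose length is computed up front; same cost, different algorithm.

-- ===== PORT A =====
-- the while loop of A, as recursion on the decreasing measure |vx| + max vy 0
def midLoop (vx : Int) (vy : Int) (x : Int) (y : Int) (res : List (Int × Int)) :
    (List (Int × Int)) × Int :=
  if vx ≠ 0 ∨ vy > 0 then
    midLoop (if vx < 0 then vx + 1 else if vx > 0 then vx - 1 else vx) (vy - 1)
      (x + vx) (y + vy) (res ++ [(x + vx, y + vy)])
  else (res, vy)
termination_by vx.natAbs + vy.toNat
decreasing_by
  split_ifs <;> omega

def mid_traj (vx : Int) (vy : Int) : (List (Int × Int)) × Int :=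
  midLoop vx vy 0 0 [(0, 0)]

-- ===== PORT B =====
-- helper tri of Source B:  m * (m - 1) // 2
def tri (m : Int) : Int := PySem.Int.floordiv (m * (m - 1)) 2

def mid_traj_alt (vx : Int) (vy : Int) : (List (Int × Int)) × Int :=
  let a := |vx|
  let s : Int := (if vx > 0 then 1 else 0) - (if vx < 0 then 1 else 0)
  let n := max a vy
  let res := (PySem.List.pyRange 0 (n + 1) 1).map
      (fun t => (s * (min t a * a - tri (min t a)), t * vy - tri t))
  (res, vy - n)

-- ===== PRECONDITION & SPEC =====
def Spec_mid_traj (vx : Int) (vy : Int) (out : (List (Int × Int)) × Int) : Prop := out = mid_traj_alt vx vy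
instance (vx : Int) (vy : Int) (out : (List (Int × Int)) × Int) : Decidable (Spec_mid_traj vx vy out) := by unfold Spec_mid_traj; infer_instance

-- ===== CLAIM (what is proved, stated in full; the proofs are below) =====
def Claim_equal_mid_traj : Prop := ∀ (vx : Int) (vy : Int), Dom_mid_traj vx vy → Spec_mid_traj vx vy (mid_traj vx vy)

-- ===== LEMMAS AND PROOFS =====

-- the point B computes for time t (the map body of mid_traj_alt)
def trajPt (vx : Int) (vy : Int) (t : Int) : Int × Int :=
  (((if vx > 0 then (1 : Int) else 0) - (if vx < 0 then 1 else 0)) *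
      (min t |vx| * |vx| - tri (min t |vx|)),
   t * vy - tri t)

lemma two_mul_tri (m : Int) : 2 * tri m = m * (m - 1) := by
  obtain ⟨k, hk⟩ : ∃ k, m * (m - 1) = 2 * k := by
    rcases Int.even_or_odd m with ⟨k, hk⟩ | ⟨k, hk⟩
    · exact ⟨k * (m - 1), by rw [hk]; ring⟩
    · exact ⟨m * k, by rw [hk]; ring⟩
  unfold tri
  rw [PySem.Int.floordiv_eq_ediv_of_pos (by norm_num), hk, Int.mul_ediv_cancel_left _ (by norm_num)]

lemma tri_succ (m : Int) : tri (m + 1) = tri m + m := by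
  have h1 := two_mul_tri (m + 1)
  have h2 := two_mul_tri m
  have h3 : (m + 1) * (m + 1 - 1) = m * (m - 1) + 2 * m := by ring
  linarith

lemma tri_zero : tri 0 = 0 := by decide

lemma trajPt_zero (vx vy : Int) : trajPt vx vy 0 = (0, 0) := by
  unfold trajPt
  rw [min_eq_left (abs_nonneg vx), tri_zero]
  simp

lemma trajPt_fst_step (vx t : Int) (ht : 0 ≤ t) :
    (trajPt vx 0 (t + 1)).1 =
      vx + (trajPt (if vx < 0 then vx + 1 else if vx > 0 then vx - 1 else vx) 0 t).1 := by
  unfold trajPt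
  rcases lt_trichotomy vx 0 with hneg | hzero | hpos
  · rw [if_pos hneg]
    by_cases hv1 : vx + 1 < 0
    · simp only [if_neg (by omega : ¬ vx > 0), if_pos hneg, if_neg (by omega : ¬ vx + 1 > 0),
        if_pos hv1, abs_of_neg hneg, abs_of_neg hv1]
      have hm : min t (-(vx + 1)) = min (t + 1) (-vx) - 1 := by omega
      rw [hm]
      have htri : tri (min (t + 1) (-vx)) = tri (min (t + 1) (-vx) - 1) + (min (t + 1) (-vx) - 1) := by
        have := tri_succ (min (t + 1) (-vx) - 1)
        rw [show min (t + 1) (-vx) - 1 + 1 = min (t + 1) (-vx) by ring] at this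
        exact this
      linear_combination htri
    · have hvx : vx = -1 := by omega
      subst hvx
      norm_num
      rw [min_eq_right (show (1:Int) ≤ t + 1 by omega)]
      have : tri 1 = 0 := by decide
      omega
  · subst hzero; simp
  · rw [if_neg (by omega : ¬ vx < 0), if_pos hpos]
    by_cases hv1 : vx - 1 > 0
    · simp only [if_pos hpos, if_neg (by omega : ¬ vx < 0), if_pos hv1,
        if_neg (by omega : ¬ vx - 1 < 0), abs_of_pos hpos, abs_of_pos hv1]
      have hm : min t (vx - 1) = min (t + 1) vx - 1 := by omega
      rw [hm]
      have htri : tri (min (t + 1) vx) = tri (min (t + 1) vx - 1) + (min (t + 1) vx - 1) := by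
        have := tri_succ (min (t + 1) vx - 1)
        rw [show min (t + 1) vx - 1 + 1 = min (t + 1) vx by ring] at this
        exact this
      linear_combination -htri
    · have hvx : vx = 1 := by omega
      subst hvx
      norm_num
      rw [min_eq_right (show (1:Int) ≤ t + 1 by omega)]
      have : tri 1 = 0 := by decide
      omega

lemma trajPt_snd_step (vy t : Int) :
    (trajPt 0 vy (t + 1)).2 = vy + (trajPt 0 (vy - 1) t).2 := by
  unfold trajPt
  have := tri_succ t
  simp only
  linarith

lemma trajPt_step (vx vy t : Int) (ht : 0 ≤ t) :
    trajPt vx vy (t + 1) =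
      (vx + (trajPt (if vx < 0 then vx + 1 else if vx > 0 then vx - 1 else vx) (vy - 1) t).1,
       vy + (trajPt (if vx < 0 then vx + 1 else if vx > 0 then vx - 1 else vx) (vy - 1) t).2) := by
  refine Prod.ext ?_ ?_
  · exact trajPt_fst_step vx t ht
  · exact trajPt_snd_step vy t

lemma loop_eq (vx vy x y : Int) (res : List (Int × Int)) :
    midLoop vx vy x y res =
      (res ++ (PySem.List.pyRange 1 (max |vx| vy + 1) 1).map
          (fun t => (x + (trajPt vx vy t).1, y + (trajPt vx vy t).2)),
       vy - max |vx| vy) := by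
  induction vx, vy, x, y, res using midLoop.induct with
  | case1 vx vy x y res hcond ih =>
    rw [midLoop]
    rw [if_pos hcond]
    simp only [dite_eq_ite] at ih
    rw [ih]
    have hn : max |if vx < 0 then vx + 1 else if vx > 0 then vx - 1 else vx| (vy - 1) =
        max |vx| vy - 1 := by
      rcases lt_trichotomy vx 0 with h | h | h
      · rw [if_pos h, abs_of_neg h, abs_of_nonpos (by omega : vx + 1 ≤ 0)]; omega
      · subst h
        have hvy : vy > 0 := hcond.resolve_left (by simp)
        rw [if_neg (by omega : ¬ (0:Int) < 0), if_neg (by omega : ¬ (0:Int) > 0), abs_zero]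
        omega
      · rw [if_neg (by omega : ¬ vx < 0), if_pos h, abs_of_pos h,
          abs_of_nonneg (by omega : (0:Int) ≤ vx - 1)]
        omega
    have hpos : 1 ≤ max |vx| vy := by
      rcases hcond with h | h
      · have h1 : (1:Int) ≤ |vx| := by
          rcases lt_trichotomy vx 0 with h' | h' | h'
          · rw [abs_of_neg h']; omega
          · exact absurd h' h
          · rw [abs_of_pos h']; omega
        exact le_trans h1 (le_max_left _ _)
      · exact le_trans (by omega) (le_max_right _ _)
    refine Prod.ext ?_ ?_
    · simp only
      rw [PySem.List.pyRange_one_cons (by omega : (1:Int) < max |vx| vy + 1)]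
      have hr2 : PySem.List.pyRange (1 + 1) (max |vx| vy + 1) 1 =
          (PySem.List.pyRange 1
            (max |if vx < 0 then vx + 1 else if vx > 0 then vx - 1 else vx| (vy - 1) + 1) 1).map
            (fun t => t + 1) := by
        rw [hn, PySem.List.pyRange_one, PySem.List.pyRange_one, List.map_map]
        rw [show (max |vx| vy + 1 - (1 + 1)).toNat = (max |vx| vy - 1 + 1 - 1).toNat by omega]
        refine List.map_congr_left (fun k _ => ?_)
        simp only [Function.comp_apply]; ring
      rw [hr2, List.map_cons, List.map_map]
      have hhead : (x + (trajPt vx vy 1).1, y + (trajPt vx vy 1).2) = (x + vx, y + vy) := by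
        have h1 := trajPt_step vx vy 0 le_rfl
        rw [show (0:Int) + 1 = 1 by ring] at h1
        rw [h1, trajPt_zero]
        refine Prod.ext ?_ ?_ <;> simp
      rw [hhead]
      rw [List.append_assoc, List.cons_append, List.nil_append]
      congr 2
      refine List.map_congr_left (fun t htm => ?_)
      have ht0 : 0 ≤ t := by
        have := PySem.List.mem_pyRange_one.mp htm
        omega
      simp only [Function.comp_apply]
      rw [trajPt_step vx vy t ht0]
      refine Prod.ext ?_ ?_ <;> (simp only; ring)
    · simp only
      omega
  | case2 vx vy x y res hcond =>
    rw [midLoop]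
    rw [if_neg hcond]
    push Not at hcond
    obtain ⟨h0, hle⟩ := hcond
    have h0' : vx = 0 := by omega
    subst h0'
    rw [abs_zero, show max (0:Int) vy = 0 by omega]
    rw [PySem.List.pyRange_one_eq_nil (by omega : (0:Int) + 1 ≤ 1)]
    simp

lemma alt_eq (vx vy : Int) :
    mid_traj_alt vx vy =
      ((PySem.List.pyRange 0 (max |vx| vy + 1) 1).map (trajPt vx vy), vy - max |vx| vy) := rfl

-- ===== VERDICT (by name: the statement is the Claim_ definition above) =====
theorem mid_traj_spec : Claim_equal_mid_traj := by
  intro vx vy _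
  unfold Spec_mid_traj mid_traj
  rw [loop_eq, alt_eq]
  have hge : (0 : Int) ≤ max |vx| vy := le_trans (abs_nonneg vx) (le_max_left _ _)
  rw [PySem.List.pyRange_one_cons (by omega : (0:Int) < max |vx| vy + 1)]
  rw [List.map_cons, trajPt_zero]
  refine Prod.ext ?_ rfl
  simp only
  rw [show (0:Int) + 1 = 1 by ring]
  refine congrArg₂ _ rfl (List.map_congr_left (fun t _ => ?_))
  simp
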